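-- pv_equiv track=rewrite | github.com/Ilonczai-Andras/Python-programming-projects | Engineering-calculator-thesis/Engineering calculator/GUI/ProgrammerCalculatorWindow.py | contain_arithmetic
-- ===== SOURCE A (Python) =====
-- def contain_arithmetic(string):
--     contains_arithmetic = False
--     arithmetic_exp = ["*", "/", "%", "-", "+"]
--
--     for op in arithmetic_exp:
--         if op in string:
--             contains_arithmetic = True
--             break
--
--     return contains_arithmetic
-- ===== SOURCE B (Python) =====
-- def contain_arithmetic(string):
--     ops = "*/%-+"
--     return any(c in ops for c in string)
-- ===== Notes on version B (the rewrite author's own statement) =====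
-- stated objective: idiomatic
-- what changed: B makes one pass over the input's characters testing membership in an operator set (any(c in ops for c in string)), instead of A's loop over the five operators each doing a full substring scan of the input.
import Mathlib
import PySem

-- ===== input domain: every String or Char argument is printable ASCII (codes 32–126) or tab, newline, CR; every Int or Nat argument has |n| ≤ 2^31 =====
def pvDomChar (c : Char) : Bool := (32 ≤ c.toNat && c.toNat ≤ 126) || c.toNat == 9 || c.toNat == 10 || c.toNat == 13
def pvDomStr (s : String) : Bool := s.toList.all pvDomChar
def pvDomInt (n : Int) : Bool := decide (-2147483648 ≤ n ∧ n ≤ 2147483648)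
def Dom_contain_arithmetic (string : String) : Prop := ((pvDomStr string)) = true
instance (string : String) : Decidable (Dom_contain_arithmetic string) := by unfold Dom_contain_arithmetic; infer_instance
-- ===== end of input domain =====

-- B iterates the input's characters once testing membership in the operator string,
-- instead of A's loop over the five operators each scanning the whole input (objective: idiomatic).

-- ===== PORT A =====
-- the for-op loop with break: first operator found in the string sets the flag and stops
def containArithLoop (ops : List String) (s : String) : Bool :=
  match ops with
  | [] => false
  | op :: rest => if PySem.Str.isIn op s then true else containArithLoop rest s

def contain_arithmetic (string : String) : Bool :=
  containArithLoop ["*", "/", "%", "-", "+"] string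

-- ===== PORT B =====
def contain_arithmetic_alt (string : String) : Bool :=
  string.toList.any (fun c => "*/%-+".toList.contains c)

-- ===== PRECONDITION & SPEC =====
def Spec_contain_arithmetic (string : String) (out : Bool) : Prop := out = contain_arithmetic_alt string
instance (string : String) (out : Bool) : Decidable (Spec_contain_arithmetic string out) := by unfold Spec_contain_arithmetic; infer_instance

-- ===== CLAIM (what is proved, stated in full; the proofs are below) =====
def Claim_equal_contain_arithmetic : Prop := ∀ (string : String), Dom_contain_arithmetic string → Spec_contain_arithmetic string (contain_arithmetic string)

-- ===== LEMMAS AND PROOFS =====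

-- a single-character substring test is just character membership
theorem isIn_single (c : Char) (s : String) :
    PySem.Str.isIn (String.ofList [c]) s = s.toList.contains c := by
  rcases h : PySem.Str.isIn (String.ofList [c]) s with _ | _
  · have := (PySem.Str.isIn_iff_infix (String.ofList [c]) s)
    simp only [h] at this
    simpa [List.singleton_infix_iff, eq_comm] using fun hm => this.symm.mp (by simpa [List.singleton_infix_iff] using hm)
  · have := (PySem.Str.isIn_iff_infix (String.ofList [c]) s).mp h
    simp only [String.toList_ofList, List.singleton_infix_iff] at this
    simp [this]

theorem contain_arithmetic_eq (s : String) :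
    contain_arithmetic s = contain_arithmetic_alt s := by
  have h : ∀ op : Char, PySem.Str.isIn (String.ofList [op]) s = s.toList.contains op :=
    fun op => isIn_single op s
  simp only [contain_arithmetic, contain_arithmetic_alt, containArithLoop,
    show ("*" : String) = String.ofList ['*'] from rfl,
    show ("/" : String) = String.ofList ['/'] from rfl,
    show ("%" : String) = String.ofList ['%'] from rfl,
    show ("-" : String) = String.ofList ['-'] from rfl,
    show ("+" : String) = String.ofList ['+'] from rfl, h]
  simp only [List.contains_eq_mem, decide_eq_true_iff]
  by_cases h1 : '*' ∈ s.toList <;> by_cases h2 : '/' ∈ s.toList <;>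
    by_cases h3 : '%' ∈ s.toList <;> by_cases h4 : '-' ∈ s.toList <;>
    by_cases h5 : '+' ∈ s.toList <;>
    simp [h1, h2, h3, h4, h5] <;>
    first
      | exact ⟨_, h1, by simp⟩
      | exact ⟨_, h2, by simp⟩
      | exact ⟨_, h3, by simp⟩
      | exact ⟨_, h4, by simp⟩
      | exact ⟨_, h5, by simp⟩
      | (intro x hx; refine ⟨?_, ?_, ?_, ?_, ?_⟩ <;> rintro rfl <;> simp_all)

-- ===== VERDICT (by name: the statement is the Claim_ definition above) =====
theorem contain_arithmetic_spec : Claim_equal_contain_arithmetic := by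
  intro s _
  show contain_arithmetic s = contain_arithmetic_alt s
  exact contain_arithmetic_eq s
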